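-- pv_equiv track=rewrite | github.com/dmitry487/muzic2 | scripts/generate_lrc.py | lcs_alignment
-- ===== SOURCE A (Python) =====
-- from typing import List, Tuple, Optional
--
-- def lcs_alignment(a: List[str], b: List[str]) -> List[Tuple[Optional[int], Optional[int]]]:
--     """
--     LCS-based alignment indices: pairs (i in a or None, j in b or None).
--     Упрощённо: строим LCS и восстанавливаем пары индексов.
--     """
--     na, nb = len(a), len(b)
--     # dp[i][j] = LCS length for a[:i], b[:j]
--     dp = [[0] * (nb + 1) for _ in range(na + 1)]
--     for i in range(1, na + 1):
--         for j in range(1, nb + 1):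
--             if a[i - 1] == b[j - 1]:
--                 dp[i][j] = dp[i - 1][j - 1] + 1
--             else:
--                 dp[i][j] = max(dp[i - 1][j], dp[i][j - 1])
--     # backtrack
--     pairs = []
--     i, j = na, nb
--     while i > 0 or j > 0:
--         if i > 0 and j > 0 and a[i - 1] == b[j - 1]:
--             pairs.append((i - 1, j - 1))
--             i -= 1
--             j -= 1
--         elif j > 0 and (i == 0 or dp[i][j - 1] >= dp[i - 1][j]):
--             pairs.append((None, j - 1))
--             j -= 1
--         else:
--             pairs.append((i - 1, None))
--             i -= 1
--     pairs.reverse()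
--     return pairs
-- ===== SOURCE B (Python) =====
-- from typing import List, Tuple, Optional
--
-- def lcs_alignment(a: List[str], b: List[str]) -> List[Tuple[Optional[int], Optional[int]]]:
--     """Single forward pass that carries the alignment itself (as shared
--     persistent linked lists) alongside each score: no backtrack phase at all."""
--     na, nb = len(a), len(b)
--     # cell = (lcs_score, node) ; node = None | (pair, tail), newest pair first
--     row = [(0, None)]
--     for j in range(1, nb + 1):
--         s, node = row[j - 1]
--         row.append((s, ((None, j - 1), node)))
--     for i in range(1, na + 1):
--         s0, n0 = row[0]
--         new = [(s0, ((i - 1, None), n0))]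
--         for j in range(1, nb + 1):
--             if a[i - 1] == b[j - 1]:
--                 s, node = row[j - 1]
--                 new.append((s + 1, ((i - 1, j - 1), node)))
--             else:
--                 sl, nl = new[j - 1]
--                 su, nu = row[j]
--                 if sl >= su:
--                     new.append((sl, ((None, j - 1), nl)))
--                 else:
--                     new.append((su, ((i - 1, None), nu)))
--         row = new
--     pairs = []
--     node = row[nb][1]
--     while node is not None:
--         pairs.append(node[0])
--         node = node[1]
--     pairs.reverse()
--     return pairs
-- ===== Notes on version B (the rewrite author's own statement) =====
-- stated objective: alternative
-- what changed: One forward pass carries the alignment itself (shared persistent linked lists) alongside each score, so the two-phase table-then-backtrack structure disappears entirely; only a rolling row is kept.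
import Mathlib
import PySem

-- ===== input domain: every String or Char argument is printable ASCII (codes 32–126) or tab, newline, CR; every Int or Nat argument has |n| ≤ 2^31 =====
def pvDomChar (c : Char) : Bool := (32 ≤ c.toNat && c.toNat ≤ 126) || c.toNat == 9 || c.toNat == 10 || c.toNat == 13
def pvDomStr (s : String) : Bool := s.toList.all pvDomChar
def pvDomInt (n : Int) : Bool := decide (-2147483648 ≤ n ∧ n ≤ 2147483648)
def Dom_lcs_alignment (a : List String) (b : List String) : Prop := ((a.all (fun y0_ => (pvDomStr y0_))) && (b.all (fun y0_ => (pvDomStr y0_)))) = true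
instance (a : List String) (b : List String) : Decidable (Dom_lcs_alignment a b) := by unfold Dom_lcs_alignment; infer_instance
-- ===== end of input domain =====

-- B replaces the dp-table-then-backtrack structure by a single forward pass whose cells
-- carry the alignment itself (shared cons lists) next to the score; same asymptotic cost
-- (objective: alternative).

-- ===== PORT A =====
-- row i of the dp table, entries j = 1 .. nb, computed left to right:
-- `left` is dp[i][j-1]; prev is dp[i-1] from index j-1 on (pdiag = dp[i-1][j-1], pup = dp[i-1][j]).
def pvRowA (ai : String) (left : Int) : List Int → List String → List Int
  | pdiag :: pup :: prest, bj :: brest =>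
      let v := if ai = bj then pdiag + 1 else max pup left
      v :: pvRowA ai v (pup :: prest) brest
  | _, _ => []

-- rows i = 1 .. na of the dp table (each prefixed with dp[i][0] = 0)
def pvRowsA (b : List String) : List String → List Int → List (List Int)
  | [], _ => []
  | ai :: arest, prev =>
      let r := (0 : Int) :: pvRowA ai 0 prev b
      r :: pvRowsA b arest r

def pvDpA (a b : List String) : List (List Int) :=
  List.replicate (b.length + 1) (0 : Int) :: pvRowsA b a (List.replicate (b.length + 1) 0)

-- backtrack of A: branch order as in the Python (match first, then the dp comparison)
def pvBackA (a b : List String) (dp : List (List Int)) : Nat → Nat → List (Option Int × Option Int)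
  | 0, 0 => []
  | 0, j+1 => (none, some (j : Int)) :: pvBackA a b dp 0 j
  | i+1, 0 => (some (i : Int), none) :: pvBackA a b dp i 0
  | i+1, j+1 =>
      if a.getD i "" = b.getD j "" then
        (some (i : Int), some (j : Int)) :: pvBackA a b dp i j
      else if (dp.getD (i+1) []).getD j 0 ≥ (dp.getD i []).getD (j+1) 0 then
        (none, some (j : Int)) :: pvBackA a b dp (i+1) j
      else
        (some (i : Int), none) :: pvBackA a b dp i (j+1)
  termination_by i j => i + j

def lcs_alignment (a : List String) (b : List String) : List (Option Int × Option Int) :=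
  (pvBackA a b (pvDpA a b) a.length b.length).reverse

-- ===== PORT B =====
-- a cell is (lcs score, alignment so far, newest pair first); the cons lists share tails
-- exactly like the Python's linked tuples.

-- row 0: the j-th append of the first Python loop (j = row.length each time)
def pvRow0Go : Nat → List (Int × List (Option Int × Option Int)) → List (Int × List (Option Int × Option Int))
  | 0, row => row
  | k+1, row =>
      let j := row.length
      let c := row.getD (j-1) (0, [])
      pvRow0Go k (row ++ [(c.1, ((none : Option Int), some ((j : Int) - 1)) :: c.2)])

-- loop body of the inner loop for row i (idx = i-1 in Python terms); j = new.length
def pvCellB (ai : String) (b : List String)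
    (row new : List (Int × List (Option Int × Option Int))) (idx : Int) :
    Int × List (Option Int × Option Int) :=
  let j := new.length
  if ai = b.getD (j-1) "" then
    let c := row.getD (j-1) (0, [])
    (c.1 + 1, (some idx, some ((j : Int) - 1)) :: c.2)
  else
    let cl := new.getD (j-1) (0, [])
    let cu := row.getD j (0, [])
    if cl.1 ≥ cu.1 then (cl.1, ((none : Option Int), some ((j : Int) - 1)) :: cl.2)
    else (cu.1, (some idx, (none : Option Int)) :: cu.2)

-- inner loop for row i
def pvInnerB (ai : String) (b : List String) (row : List (Int × List (Option Int × Option Int))) (idx : Int) :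
    Nat → List (Int × List (Option Int × Option Int)) → List (Int × List (Option Int × Option Int))
  | 0, new => new
  | k+1, new => pvInnerB ai b row idx k (new ++ [pvCellB ai b row new idx])

-- outer loop over the elements of a
def pvOuterB (b : List String) (nb : Nat) :
    List String → Int → List (Int × List (Option Int × Option Int)) → List (Int × List (Option Int × Option Int))
  | [], _, row => row
  | ai :: rest, idx, row =>
      let c0 := row.getD 0 (0, [])
      let new := [(c0.1, (some idx, (none : Option Int)) :: c0.2)]
      pvOuterB b nb rest (idx + 1) (pvInnerB ai b row idx nb new)

-- the final while loop walking the linked list (here: the cons list itself)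
def pvCollect : List (Option Int × Option Int) → List (Option Int × Option Int)
  | [] => []
  | p :: rest => p :: pvCollect rest

def lcs_alignment_alt (a : List String) (b : List String) : List (Option Int × Option Int) :=
  (pvCollect ((pvOuterB b b.length a 0
      (pvRow0Go b.length [((0 : Int), ([] : List (Option Int × Option Int)))])).getD b.length (0, [])).2).reverse

-- ===== PRECONDITION & SPEC =====
def Spec_lcs_alignment (a : List String) (b : List String) (out : List (Option Int × Option Int)) : Prop := out = lcs_alignment_alt a b
instance (a : List String) (b : List String) (out : List (Option Int × Option Int)) : Decidable (Spec_lcs_alignment a b out) := by unfold Spec_lcs_alignment; infer_instance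

-- ===== CLAIM (what is proved, stated in full; the proofs are below) =====
def Claim_equal_lcs_alignment : Prop := ∀ (a : List String) (b : List String), Dom_lcs_alignment a b → Spec_lcs_alignment a b (lcs_alignment a b)

-- ===== LEMMAS AND PROOFS =====

-- dp value and the "ideal" cell B should hold at (i, j)
def pvDpF (a b : List String) (i j : Nat) : Int := ((pvDpA a b).getD i []).getD j 0
def pvCellSpec (a b : List String) (i j : Nat) : Int × List (Option Int × Option Int) :=
  (pvDpF a b i j, pvBackA a b (pvDpA a b) i j)
def pvRowSpec (a b : List String) (i : Nat) : List (Int × List (Option Int × Option Int)) :=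
  (List.range (b.length + 1)).map (pvCellSpec a b i)

theorem pvRowA_length (ai : String) : ∀ (bs : List String) (prev : List Int) (left : Int),
    prev.length = bs.length + 1 → (pvRowA ai left prev bs).length = bs.length := by
  intro bs
  induction bs with
  | nil => intro prev left h
           match prev with
           | [] => simp at h
           | p :: ps => simp [pvRowA]
  | cons bj brest ih =>
    intro prev left h
    match prev with
    | [] => simp at h
    | [p] => simp at h
    | pdiag :: pup :: prest =>
      simp only [pvRowA, List.length_cons]
      rw [ih (pup :: prest) _ (by simpa using h)]

-- row extraction: the i-th stored row is built from the (i-1)-th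
theorem pvRowsA_getD (b : List String) : ∀ (as_ : List String) (prev : List Int) (i : Nat),
    i < as_.length →
    (pvRowsA b as_ prev).getD i [] =
      (0 : Int) :: pvRowA (as_.getD i "") 0 ((prev :: pvRowsA b as_ prev).getD i []) b := by
  intro as_
  induction as_ with
  | nil => intro prev i h; simp at h
  | cons ai arest ih =>
    intro prev i h
    cases i with
    | zero => simp [pvRowsA]
    | succ i =>
      simp only [pvRowsA, List.getD_cons_succ]
      have := ih ((0 : Int) :: pvRowA ai 0 prev b) i (by simpa using h)
      simpa [pvRowsA] using this

theorem pv_getD_map {α β : Type} (f : α → β) : ∀ (l : List α) (k : Nat), k < l.length →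
    ∀ (d : β) (d' : α), (l.map f).getD k d = f (l.getD k d') := by
  intro l
  induction l with
  | nil => intro k h; simp at h
  | cons x xs ih =>
    intro k h d d'
    cases k with
    | zero => simp
    | succ k => simpa using ih k (by simpa using h) d d'

theorem pv_getD_range (n k : Nat) (h : k < n) (d : Nat) : (List.range n).getD k d = k := by
  rw [List.getD_eq_getElem _ _ (by simpa using h)]
  simp

theorem pv_getD_map_range {β : Type} (f : Nat → β) (n k : Nat) (h : k < n) (d : β) :
    ((List.range n).map f).getD k d = f k := by
  rw [pv_getD_map f _ k (by simpa using h) d 0, pv_getD_range n k h]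

-- every dp row (up to na) has length nb + 1
theorem pvDpA_row_length (a b : List String) : ∀ (i : Nat), i ≤ a.length →
    ((pvDpA a b).getD i []).length = b.length + 1 := by
  suffices h : ∀ (as_ : List String) (prev : List Int), prev.length = b.length + 1 →
      ∀ i, i < as_.length → ((pvRowsA b as_ prev).getD i []).length = b.length + 1 by
    intro i hi
    cases i with
    | zero => simp [pvDpA]
    | succ i =>
      simp only [pvDpA, List.getD_cons_succ]
      exact h a (List.replicate (b.length + 1) 0) (by simp) i (by omega)
  intro as_
  induction as_ with
  | nil => intro prev hp i h; simp at h
  | cons ai arest ih =>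
    intro prev hp i h
    cases i with
    | zero => simp [pvRowsA, pvRowA_length ai b prev 0 hp]
    | succ i =>
      simp only [pvRowsA, List.getD_cons_succ]
      exact ih ((0 : Int) :: pvRowA ai 0 prev b) (by simp [pvRowA_length ai b prev 0 hp]) i (by simpa using h)

-- dp-table recurrence: row i (1 ≤ i ≤ na) is built from row i-1
theorem pvDpA_getD_succ (a b : List String) (i : Nat) (h : i < a.length) :
    (pvDpA a b).getD (i+1) [] =
      (0 : Int) :: pvRowA (a.getD i "") 0 ((pvDpA a b).getD i []) b := by
  have h2 := pvRowsA_getD b a (List.replicate (b.length + 1) 0) i h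
  cases i with
  | zero => simpa [pvDpA] using h2
  | succ i => simpa [pvDpA] using h2

-- cell-level recurrence of an A-row
theorem pvRowA_getD (ai : String) : ∀ (bs : List String) (prev : List Int) (left : Int) (j : Nat),
    j < bs.length → prev.length = bs.length + 1 →
    (pvRowA ai left prev bs).getD j 0 =
      if ai = bs.getD j "" then prev.getD j 0 + 1
      else max (prev.getD (j+1) 0)
        (if j = 0 then left else (pvRowA ai left prev bs).getD (j-1) 0) := by
  intro bs
  induction bs with
  | nil => intro prev left j h; simp at h
  | cons bj brest ih =>
    intro prev left j h hp
    match prev with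
    | [] => simp at hp
    | [p] => simp at hp
    | pdiag :: pup :: prest =>
      cases j with
      | zero =>
        by_cases hm : ai = bj
        · simp [pvRowA, hm]
        · simp [pvRowA, hm, max_comm]
      | succ j =>
        have hlen : (pup :: prest).length = brest.length + 1 := by simpa using hp
        have hj2 : j < brest.length := by simpa using h
        simp only [pvRowA, List.getD_cons_succ, Nat.succ_sub_one]
        rw [ih (pup :: prest) _ j hj2 hlen]
        cases j with
        | zero => simp
        | succ j => simp

theorem pvDpF_row0 (a b : List String) (j : Nat) : pvDpF a b 0 j = 0 := by
  unfold pvDpF pvDpA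
  rw [List.getD_cons_zero]
  rcases Nat.lt_or_ge j (b.length + 1) with h | h
  · exact List.getD_replicate _ h
  · rw [List.getD_eq_default]
    simpa using h

theorem pvDpF_col0 (a b : List String) (i : Nat) (hi : i ≤ a.length) : pvDpF a b i 0 = 0 := by
  cases i with
  | zero => exact pvDpF_row0 a b 0
  | succ i =>
    unfold pvDpF
    rw [pvDpA_getD_succ a b i (by omega)]
    simp

theorem pvDpF_succ (a b : List String) (i j : Nat) (hi : i < a.length) (hj : j < b.length) :
    pvDpF a b (i+1) (j+1) =
      if a.getD i "" = b.getD j "" then pvDpF a b i j + 1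
      else max (pvDpF a b i (j+1)) (pvDpF a b (i+1) j) := by
  have hrow : ((pvDpA a b).getD i []).length = b.length + 1 := pvDpA_row_length a b i (le_of_lt hi)
  unfold pvDpF
  rw [pvDpA_getD_succ a b i hi, List.getD_cons_succ,
      pvRowA_getD (a.getD i "") b ((pvDpA a b).getD i []) 0 j hj hrow]
  cases j with
  | zero => simp
  | succ j => simp

theorem pvCollect_id : ∀ (l : List (Option Int × Option Int)), pvCollect l = l := by
  intro l
  induction l with
  | nil => rfl
  | cons p rest ih => simp [pvCollect, ih]

-- one-step unfoldings of A's backtrack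
theorem pvBackA_00 (a b : List String) (dp : List (List Int)) :
    pvBackA a b dp 0 0 = [] := by rw [pvBackA]

theorem pvBackA_0succ (a b : List String) (dp : List (List Int)) (j : Nat) :
    pvBackA a b dp 0 (j+1) = ((none : Option Int), some (j : Int)) :: pvBackA a b dp 0 j := by
  rw [pvBackA]

theorem pvBackA_succ0 (a b : List String) (dp : List (List Int)) (i : Nat) :
    pvBackA a b dp (i+1) 0 = (some (i : Int), (none : Option Int)) :: pvBackA a b dp i 0 := by
  rw [pvBackA]

theorem pvBackA_succsucc (a b : List String) (dp : List (List Int)) (i j : Nat) :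
    pvBackA a b dp (i+1) (j+1) =
      if a.getD i "" = b.getD j "" then
        (some (i : Int), some (j : Int)) :: pvBackA a b dp i j
      else if (dp.getD (i+1) []).getD j 0 ≥ (dp.getD i []).getD (j+1) 0 then
        ((none : Option Int), some (j : Int)) :: pvBackA a b dp (i+1) j
      else
        (some (i : Int), (none : Option Int)) :: pvBackA a b dp i (j+1) := by
  rw [pvBackA]

theorem pv_cast_sub (m : Nat) : ((m+1 : Nat) : Int) - 1 = (m : Int) := by push_cast; ring

theorem pv_map_range_snoc {β : Type} (f : Nat → β) (m : Nat) :
    (List.range (m+1)).map f ++ [f (m+1)] = (List.range (m+2)).map f := by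
  rw [List.range_succ (n := m+1)]
  simp

-- row 0 of B equals the ideal row 0
theorem pvRow0Go_spec (a b : List String) : ∀ (k m : Nat), m + k = b.length →
    pvRow0Go k ((List.range (m+1)).map (pvCellSpec a b 0)) = pvRowSpec a b 0 := by
  intro k
  induction k with
  | zero =>
    intro m hm
    unfold pvRowSpec
    have h : m = b.length := by omega
    rw [← h]
    rfl
  | succ k ih =>
    intro m hm
    rw [pvRow0Go]
    have hlen : ((List.range (m+1)).map (pvCellSpec a b 0)).length = m + 1 := by simp
    have hget : ((List.range (m+1)).map (pvCellSpec a b 0)).getD m (0, []) = pvCellSpec a b 0 m :=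
      pv_getD_map_range _ _ m (by omega) _
    simp only [hlen, Nat.add_sub_cancel, hget]
    have hcell : ((pvCellSpec a b 0 m).1, ((none : Option Int), some (((m+1 : Nat) : Int) - 1)) :: (pvCellSpec a b 0 m).2)
        = pvCellSpec a b 0 (m+1) := by
      simp [pvCellSpec, pvBackA_0succ, pvDpF_row0]
    rw [hcell, pv_map_range_snoc]
    exact ih (m+1) (by omega)

-- the inner-loop body computes the ideal next cell
theorem pvCellB_spec (a b : List String) (i m : Nat) (hi : i < a.length) (hm : m < b.length) :
    pvCellB (a.getD i "") b (pvRowSpec a b i) ((List.range (m+1)).map (pvCellSpec a b (i+1))) (i : Int)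
      = pvCellSpec a b (i+1) (m+1) := by
  unfold pvCellB
  have hlen : ((List.range (m+1)).map (pvCellSpec a b (i+1))).length = m + 1 := by simp
  have hrow_m : (pvRowSpec a b i).getD m (0, []) = pvCellSpec a b i m := by
    unfold pvRowSpec; exact pv_getD_map_range _ _ m (by omega) _
  have hrow_m1 : (pvRowSpec a b i).getD (m+1) (0, []) = pvCellSpec a b i (m+1) := by
    unfold pvRowSpec; exact pv_getD_map_range _ _ (m+1) (by omega) _
  have hnew_m : ((List.range (m+1)).map (pvCellSpec a b (i+1))).getD m (0, []) = pvCellSpec a b (i+1) m :=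
    pv_getD_map_range _ _ m (by omega) _
  simp only [hlen, Nat.add_sub_cancel, hrow_m, hrow_m1, hnew_m, pv_cast_sub]
  by_cases hmatch : a.getD i "" = b.getD m ""
  · simp only [pvCellSpec, pvDpF_succ a b i m hi hm, pvBackA_succsucc, if_pos hmatch]
  · by_cases hcond : (pvCellSpec a b (i+1) m).1 ≥ (pvCellSpec a b i (m+1)).1
    · simp only [if_neg hmatch, pvCellSpec, pvDpF_succ a b i m hi hm, pvBackA_succsucc]
      rw [if_pos (show ((pvDpA a b).getD (i+1) []).getD m 0 ≥ ((pvDpA a b).getD i []).getD (m+1) 0 from hcond),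
          max_eq_right (show pvDpF a b i (m+1) ≤ pvDpF a b (i+1) m from hcond),
          if_pos (show pvDpF a b (i+1) m ≥ pvDpF a b i (m+1) from hcond)]
    · simp only [if_neg hmatch, pvCellSpec, pvDpF_succ a b i m hi hm, pvBackA_succsucc]
      rw [if_neg (show ¬ ((pvDpA a b).getD (i+1) []).getD m 0 ≥ ((pvDpA a b).getD i []).getD (m+1) 0 from hcond),
          max_eq_left (le_of_lt (lt_of_not_ge (show ¬ pvDpF a b (i+1) m ≥ pvDpF a b i (m+1) from hcond))),
          if_neg (show ¬ pvDpF a b (i+1) m ≥ pvDpF a b i (m+1) from hcond)]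

theorem pvInnerB_spec (a b : List String) (i : Nat) (hi : i < a.length) :
    ∀ (k m : Nat), m + k = b.length →
    pvInnerB (a.getD i "") b (pvRowSpec a b i) (i : Int) k ((List.range (m+1)).map (pvCellSpec a b (i+1)))
      = pvRowSpec a b (i+1) := by
  intro k
  induction k with
  | zero =>
    intro m hm
    unfold pvRowSpec
    have h : m = b.length := by omega
    rw [← h]
    rfl
  | succ k ih =>
    intro m hm
    rw [pvInnerB, pvCellB_spec a b i m hi (by omega), pv_map_range_snoc]
    exact ih (m+1) (by omega)

theorem pvOuterB_spec (a b : List String) : ∀ (n k : Nat), k + n = a.length →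
    pvOuterB b b.length (a.drop k) (k : Int) (pvRowSpec a b k) = pvRowSpec a b a.length := by
  intro n
  induction n with
  | zero =>
    intro k hk
    have h : k = a.length := by omega
    rw [h, List.drop_length, pvOuterB]
  | succ n ih =>
    intro k hk
    have hk2 : k < a.length := by omega
    have hdrop : a.drop k = a.getD k "" :: a.drop (k+1) := by
      rw [List.getD_eq_getElem _ _ hk2]
      exact List.drop_eq_getElem_cons hk2
    rw [hdrop, pvOuterB]
    have hc0 : (pvRowSpec a b k).getD 0 (0, []) = pvCellSpec a b k 0 := by
      unfold pvRowSpec; exact pv_getD_map_range _ _ 0 (by omega) _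
    have hnew : [((pvCellSpec a b k 0).1, (some (k : Int), (none : Option Int)) :: (pvCellSpec a b k 0).2)]
        = (List.range 1).map (pvCellSpec a b (k+1)) := by
      simp [pvCellSpec, pvDpF_col0 a b k (le_of_lt hk2), pvDpF_col0 a b (k+1) hk2, pvBackA_succ0]
    rw [hc0, hnew, pvInnerB_spec a b k hk2 b.length 0 (by omega)]
    have hcast : (k : Int) + 1 = ((k+1 : Nat) : Int) := by push_cast; ring
    rw [hcast]
    exact ih (k+1) (by omega)

-- ===== VERDICT (by name: the statement is the Claim_ definition above) =====
theorem lcs_alignment_spec : Claim_equal_lcs_alignment := by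
  intro a b _
  unfold Spec_lcs_alignment lcs_alignment lcs_alignment_alt
  have h0 : [((0 : Int), ([] : List (Option Int × Option Int)))]
      = (List.range 1).map (pvCellSpec a b 0) := by
    simp [pvCellSpec, pvDpF_row0, pvBackA_00]
  rw [h0, pvRow0Go_spec a b b.length 0 (by omega)]
  have houter := pvOuterB_spec a b a.length 0 (by omega)
  rw [List.drop_zero, Nat.cast_zero] at houter
  rw [houter]
  have hget : (pvRowSpec a b a.length).getD b.length (0, []) = pvCellSpec a b a.length b.length := by
    unfold pvRowSpec; exact pv_getD_map_range _ _ b.length (by omega) _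
  rw [hget, pvCollect_id]
  rfl
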